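-- pv_equiv track=rewrite | github.com/szymongretka/NTwI | core/keywords/keywords_searcher.py | _build_degree_rank
-- ===== SOURCE A (Python) =====
-- from typing import List, MutableSet, Generator, Tuple, Dict
-- from itertools import chain, groupby, product
-- from collections import Counter, defaultdict
--
-- def _build_degree_rank(contender_phrases: MutableSet[Tuple[str, ...]]) -> Dict[str, int]:
--     co_occurence_graph = defaultdict(lambda: defaultdict(lambda: 0))
--
--     for cp in contender_phrases:
--         for (word, coword) in product(cp, cp):
--             co_occurence_graph[word][coword] += 1
--
--     deegree_rank = defaultdict(lambda: 0)
--     for key in co_occurence_graph: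
--         deegree_rank[key] = sum(co_occurence_graph[key].values())
--
--     return deegree_rank
-- ===== SOURCE B (Python) =====
-- from collections import defaultdict
--
-- def _build_degree_rank(contender_phrases):
--     # degree(word) = sum over phrases of count(word in phrase) * len(phrase):
--     # add len(phrase) once per occurrence, no co-occurrence matrix.
--     degree_rank = defaultdict(lambda: 0)
--     for cp in contender_phrases:
--         n = len(cp)
--         for word in cp:
--             degree_rank[word] += n
--     return degree_rank
-- ===== Notes on version B (the rewrite author's own statement) =====
-- stated objective: faster
-- what changed: B never builds the co-occurrence matrix: each word occurrence directly adds len(phrase) to its degree in a single dict, instead of incrementing len(phrase)^2 pair counters per phrase and summing rows afterwards.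
import Mathlib
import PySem

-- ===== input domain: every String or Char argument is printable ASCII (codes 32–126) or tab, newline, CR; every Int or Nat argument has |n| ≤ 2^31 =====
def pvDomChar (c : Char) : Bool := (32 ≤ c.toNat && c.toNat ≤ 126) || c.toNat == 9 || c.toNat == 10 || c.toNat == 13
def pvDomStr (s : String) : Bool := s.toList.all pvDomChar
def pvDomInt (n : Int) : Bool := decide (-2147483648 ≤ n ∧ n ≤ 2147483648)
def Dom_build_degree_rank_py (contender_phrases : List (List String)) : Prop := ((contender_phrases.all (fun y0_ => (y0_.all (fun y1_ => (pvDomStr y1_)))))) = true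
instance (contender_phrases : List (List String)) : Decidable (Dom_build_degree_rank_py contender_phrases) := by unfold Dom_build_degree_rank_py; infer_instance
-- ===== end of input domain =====

-- B skips A's co-occurrence matrix (len(phrase)^2 pair counters per phrase, row sums at the end)
-- and lets each word occurrence add len(phrase) directly to one degree dict; objective: faster.

-- ===== PORT A =====
-- one pair (word, coword) of product(cp, cp): co_occurence_graph[word][coword] += 1
def pvPairStep (g : PySem.Dict String (PySem.Dict String Int)) (p : String × String) :
    PySem.Dict String (PySem.Dict String Int) :=
  let inner := g.getD p.1 PySem.Dict.empty
  g.insert p.1 (inner.insert p.2 (inner.getD p.2 0 + 1))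

def build_degree_rank_py (contender_phrases : List (List String)) : List (String × Int) :=
  let g : PySem.Dict String (PySem.Dict String Int) :=
    contender_phrases.foldl
      (fun g cp => (cp.flatMap (fun word => cp.map (fun coword => (word, coword)))).foldl pvPairStep g)
      PySem.Dict.empty
  (g.keys.foldl
      (fun dr key => dr.insert key ((g.getD key PySem.Dict.empty).values.sum))
      (PySem.Dict.empty : PySem.Dict String Int)).items

-- ===== PORT B =====
def build_degree_rank_py_alt (contender_phrases : List (List String)) : List (String × Int) :=
  (contender_phrases.foldl
      (fun d cp =>
        let n : Int := cp.length
        cp.foldl (fun d word => d.modify word 0 (· + n)) d)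
      (PySem.Dict.empty : PySem.Dict String Int)).items

-- ===== PRECONDITION & SPEC =====
def Spec_build_degree_rank_py (contender_phrases : List (List String)) (out : List (String × Int)) : Prop := out = build_degree_rank_py_alt contender_phrases
instance (contender_phrases : List (List String)) (out : List (String × Int)) : Decidable (Spec_build_degree_rank_py contender_phrases out) := by unfold Spec_build_degree_rank_py; infer_instance

-- ===== CLAIM (what is proved, stated in full; the proofs are below) =====
def Claim_equal_build_degree_rank_py : Prop := ∀ (contender_phrases : List (List String)), Dom_build_degree_rank_py contender_phrases → Spec_build_degree_rank_py contender_phrases (build_degree_rank_py contender_phrases)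

-- ===== LEMMAS AND PROOFS =====

-- invariant between A's co-occurrence graph g and B's degree dict d
def pvInv (g : PySem.Dict String (PySem.Dict String Int)) (d : PySem.Dict String Int) : Prop :=
  g.keys = d.keys ∧ g.keys.Nodup ∧
  (∀ k, (g.getD k PySem.Dict.empty).keys.Nodup) ∧
  (∀ k, d.getD k 0 = (g.getD k PySem.Dict.empty).values.sum)


theorem listSum (l : List (String × Int)) (k : String) (a x : Int)
    (hn : (l.map Prod.fst).Nodup) (hm : (k, x) ∈ l) :
    ((l.map (fun p => if (p.1 == k) = true then (k, x + a) else p)).map Prod.snd).sum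
      = (l.map Prod.snd).sum + a := by
  induction l with
  | nil => simp at hm
  | cons p t ih =>
    simp only [List.map_cons, List.nodup_cons, List.mem_map] at hn
    rcases hn with ⟨hp, hnt⟩
    rcases List.mem_cons.mp hm with h | hmt
    · have hx : p = (k, x) := h.symm
      subst hx
      have ht : (t.map (fun p => if (p.1 == k) = true then (k, x + a) else p)) = t := by
        trans (t.map id)
        · apply List.map_congr_left
          intro q hq
          have hq1 : ¬ (q.1 = k) := fun h => hp ⟨q, hq, h⟩
          simp [hq1]
        · simp
      simp only [List.map_cons, List.sum_cons, ht, beq_self_eq_true, if_true]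
      ring
    · have hpk : ¬ (p.1 = k) := by
        intro h
        exact hp ⟨(k, x), hmt, h.symm⟩
      simp only [List.map_cons, List.sum_cons, beq_iff_eq, if_neg hpk]
      have := ih hnt hmt
      simp only [beq_iff_eq] at this
      rw [this]
      ring

theorem pvSumValuesInsert (d : PySem.Dict String Int) (hd : d.keys.Nodup) (k : String) (a : Int) :
    (d.insert k (d.getD k 0 + a)).values.sum = d.values.sum + a := by
  by_cases hc : d.contains k = true
  · obtain ⟨v, hv⟩ : ∃ v, d.get? k = some v := by
      have := PySem.Dict.contains_eq_isSome_get? (d := d) (k := k)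
      rw [hc] at this
      exact Option.isSome_iff_exists.mp this.symm
    have hmem : (k, v) ∈ d.items := PySem.Dict.mem_items_of_get?_eq_some (h := hv)
    have hgd : d.getD k 0 = v := by simp [PySem.Dict.getD_eq_get?_getD, hv]
    simp only [PySem.Dict.insert, hc, if_true, PySem.Dict.values]
    rw [hgd]
    exact listSum d.items k a v hd hmem
  · have hc' : d.contains k = false := by simpa using hc
    rw [PySem.Dict.getD_of_not_contains (h := hc')]
    simp only [PySem.Dict.insert, hc', Bool.false_eq_true, if_false, PySem.Dict.values]
    simp


theorem pvInnerFoldSum (cs : List String) (i : PySem.Dict String Int) (hi : i.keys.Nodup) :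
    (cs.foldl (fun i c => i.insert c (i.getD c 0 + 1)) i).values.sum
      = i.values.sum + cs.length := by
  induction cs generalizing i with
  | nil => simp
  | cons c cs ih =>
    simp only [List.foldl_cons, List.length_cons]
    rw [ih _ (PySem.Dict.nodup_keys_insert _ _ _ hi), pvSumValuesInsert i hi c 1]
    push_cast; ring

theorem pvInnerFoldNodup (cs : List String) (i : PySem.Dict String Int) (hi : i.keys.Nodup) :
    (cs.foldl (fun i c => i.insert c (i.getD c 0 + 1)) i).keys.Nodup :=
  PySem.Dict.nodup_keys_foldl_insert cs _ i hi

theorem pvRowGetD_self (w : String) (cs : List String) (g : PySem.Dict String (PySem.Dict String Int)) :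
    ((cs.map (fun c => (w, c))).foldl pvPairStep g).getD w PySem.Dict.empty
      = cs.foldl (fun i c => i.insert c (i.getD c 0 + 1)) (g.getD w PySem.Dict.empty) := by
  induction cs generalizing g with
  | nil => simp
  | cons c cs ih =>
    simp only [List.map_cons, List.foldl_cons]
    rw [ih]
    congr 1
    simp [pvPairStep, PySem.Dict.getD_insert_self]

theorem pvRowGetD_ne (w : String) (cs : List String) (g : PySem.Dict String (PySem.Dict String Int))
    (k : String) (hk : k ≠ w) :
    ((cs.map (fun c => (w, c))).foldl pvPairStep g).getD k PySem.Dict.empty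
      = g.getD k PySem.Dict.empty := by
  induction cs generalizing g with
  | nil => simp
  | cons c cs ih =>
    simp only [List.map_cons, List.foldl_cons]
    rw [ih]
    simp only [pvPairStep]
    rw [PySem.Dict.getD_insert]
    simp [hk]

theorem pvRowKeys (w : String) (cs : List String) (hcs : cs ≠ [])
    (g : PySem.Dict String (PySem.Dict String Int)) :
    ((cs.map (fun c => (w, c))).foldl pvPairStep g).keys = PySem.Set.add g.keys w := by
  have h1 : ((cs.map (fun c => (w, c))).foldl pvPairStep g).keys
      = PySem.Set.update g.keys ((cs.map (fun c => (w, c))).map Prod.fst) := by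
    exact PySem.Dict.keys_foldl_insert_key _ _ _ _
  rw [h1]
  have h2 : (cs.map (fun c => (w, c))).map Prod.fst = cs.map (fun _ => w) := by
    simp
  rw [h2]
  rcases cs with _ | ⟨c, cs'⟩
  · exact absurd rfl hcs
  · simp only [List.map_cons, PySem.Set.update_cons]
    rw [PySem.Set.update_eq_append_filter]
    have : (PySem.Set.ofList (cs'.map (fun _ => w))).filter
        (fun y => !(PySem.Set.contains (PySem.Set.add g.keys w) y)) = [] := by
      apply List.filter_eq_nil_iff.mpr
      intro y hy
      have hyw : y = w := by
        have := (PySem.Set.mem_ofList (xs := cs'.map (fun _ => w)) (y := y)).mp hy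
        exact (by simpa using this : ¬cs' = [] ∧ y = w).2
      subst hyw
      simp [PySem.Set.mem_add]
    rw [this, List.append_nil]


theorem pvStepInv (cp : List String) (w : String) (hw : w ∈ cp)
    (g : PySem.Dict String (PySem.Dict String Int)) (d : PySem.Dict String Int)
    (h : pvInv g d) :
    pvInv ((cp.map (fun c => (w, c))).foldl pvPairStep g)
          (d.modify w 0 (· + (cp.length : Int))) := by
  obtain ⟨hkeys, hnd, hinnd, hsum⟩ := h
  have hcp : cp ≠ [] := List.ne_nil_of_mem hw
  refine ⟨?_, ?_, ?_, ?_⟩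
  · rw [pvRowKeys w cp hcp, hkeys, PySem.Set.add_eq_ite]
    by_cases hm : w ∈ d.keys
    · rw [if_pos hm]
      exact (PySem.Dict.keys_insert_of_contains (h := (PySem.Dict.contains_iff_mem_keys ..).mpr hm) ..).symm
    · rw [if_neg hm]
      exact (PySem.Dict.keys_insert_of_not_contains (h := by
        have := (PySem.Dict.contains_iff_mem_keys d w)
        rcases hb : d.contains w with _ | _
        · rfl
        · exact absurd (this.mp hb) hm) ..).symm
  · rw [pvRowKeys w cp hcp]
    exact PySem.Set.nodup_add g.keys w hnd
  · intro k
    by_cases hk : k = w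
    · subst hk
      rw [pvRowGetD_self]
      exact pvInnerFoldNodup _ _ (hinnd k)
    · rw [pvRowGetD_ne _ _ _ _ hk]
      exact hinnd k
  · intro k
    by_cases hk : k = w
    · subst hk
      rw [pvRowGetD_self, PySem.Dict.getD_modify_self,
        pvInnerFoldSum _ _ (hinnd k), hsum k]
    · rw [pvRowGetD_ne _ _ _ _ hk, PySem.Dict.getD_modify]
      simp [hk, hsum k]

theorem pvPhraseInv (cp : List String) (ws : List String) (hws : ∀ w ∈ ws, w ∈ cp)
    (g : PySem.Dict String (PySem.Dict String Int)) (d : PySem.Dict String Int)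
    (h : pvInv g d) :
    pvInv (ws.foldl (fun g w => (cp.map (fun c => (w, c))).foldl pvPairStep g) g)
          (ws.foldl (fun d w => d.modify w 0 (· + (cp.length : Int))) d) := by
  induction ws generalizing g d with
  | nil => exact h
  | cons w ws ih =>
    simp only [List.foldl_cons]
    exact ih (fun x hx => hws x (List.mem_cons_of_mem _ hx)) _ _
      (pvStepInv cp w (hws w (List.mem_cons_self ..)) g d h)

theorem pvTopInv (ps : List (List String)) (g : PySem.Dict String (PySem.Dict String Int))
    (d : PySem.Dict String Int) (h : pvInv g d) :
    pvInv (ps.foldl (fun g cp => (cp.flatMap (fun w => cp.map (fun c => (w, c)))).foldl pvPairStep g) g)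
          (ps.foldl (fun d cp => cp.foldl (fun d w => d.modify w 0 (· + (cp.length : Int))) d) d) := by
  induction ps generalizing g d with
  | nil => exact h
  | cons cp ps ih =>
    simp only [List.foldl_cons]
    apply ih
    rw [List.foldl_flatMap]
    exact pvPhraseInv cp cp (fun _ h => h) g d h



theorem pvFinal (ps : List (List String)) : build_degree_rank_py ps = build_degree_rank_py_alt ps := by
  unfold build_degree_rank_py build_degree_rank_py_alt
  have h0 : pvInv PySem.Dict.empty PySem.Dict.empty := by
    refine ⟨rfl, List.nodup_nil, ?_, ?_⟩ <;> intro k <;> simp [PySem.Dict.empty, PySem.Dict.getD, PySem.Dict.get?, PySem.Dict.values, PySem.Dict.keys]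
  have h := pvTopInv ps _ _ h0
  set g := ps.foldl (fun g cp => (cp.flatMap (fun w => cp.map (fun c => (w, c)))).foldl pvPairStep g)
    (PySem.Dict.empty : PySem.Dict String (PySem.Dict String Int)) with hg
  set d := ps.foldl (fun d cp => cp.foldl (fun d w => d.modify w 0 (· + (cp.length : Int))) d)
    (PySem.Dict.empty : PySem.Dict String Int) with hd
  obtain ⟨hkeys, hnd, hinnd, hsum⟩ := h
  have hA : (g.keys.foldl
      (fun dr key => dr.insert key ((g.getD key PySem.Dict.empty).values.sum))
      (PySem.Dict.empty : PySem.Dict String Int)).items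
      = g.keys.map (fun k => (k, (g.getD k PySem.Dict.empty).values.sum)) := by
    have := PySem.Dict.items_foldl_insert_fresh (l := g.keys) (k := fun x => x)
      (v := fun k => (g.getD k PySem.Dict.empty).values.sum)
      (d := (PySem.Dict.empty : PySem.Dict String Int))
      (by intro a _; simp [PySem.Dict.contains_empty]) (by simpa using hnd)
    simpa using this
  have hB : d.items = d.keys.map (fun k => (k, d.getD k 0)) :=
    PySem.Dict.items_eq_map_keys d (hkeys ▸ hnd) 0
  rw [hA, hB, hkeys]
  apply List.map_congr_left
  intro k _
  rw [hsum k]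


-- ===== VERDICT (by name: the statement is the Claim_ definition above) =====
theorem build_degree_rank_py_spec : Claim_equal_build_degree_rank_py := by
  intro ps _
  unfold Spec_build_degree_rank_py
  exact pvFinal ps
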